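-- pv_equiv track=rewrite | github.com/hankcs/CS224n | assignment3/q1_window.py | make_windowed_data
-- ===== SOURCE A (Python) =====
-- def make_windowed_data(data, start, end, window_size=1):
--     """Uses the input sequences in @data to construct new windowed data points.
--
--     TODO: In the code below, construct a window from each word in the
--     input sentence by concatenating the words @window_size to the left
--     and @window_size to the right to the word. Finally, add this new
--     window data point and its label. to windowed_data.
--
--     Args:
--         data: is a list of (sentence, labels) tuples. @sentence is a list
--             containing the words in the sentence and @label is a list of
--             output labels. Each word is itself a list of
--             @n_features features. For example, the sentence "Chris
--             Manning is amazing" and labels "PER PER O O" would become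
--             ([[1,9], [2,9], [3,8], [4,8]], [1, 1, 4, 4]). Here "Chris"
--             the word has been featurized as "[1, 9]", and "[1, 1, 4, 4]"
--             is the list of labels.
--         start: the featurized `start' token to be used for windows at the very
--             beginning of the sentence.
--         end: the featurized `end' token to be used for windows at the very
--             end of the sentence.
--         window_size: the length of the window to construct.
--     Returns:
--         a new list of data points, corresponding to each window in the
--         sentence. Each data point consists of a list of
--         @n_window_features features (corresponding to words from the
--         window) to be used in the sentence and its NER label.
--         If start=[5,8] and end=[6,8], the above example should return
--         the list
--         [([5, 8, 1, 9, 2, 9], 1),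
--          ([1, 9, 2, 9, 3, 8], 1),
--          ...
--          ]
--     """
--
--     windowed_data = []
--     for sentence, labels in data:
--     ### YOUR CODE HERE (5-20 lines)
--         orig_n = len(sentence)
--         # extend sentence
--         sentence = [start] * window_size + sentence + [end] * window_size
--         l = 0  # index labels
--         # loop over the original sentence
--         for i in range(window_size, orig_n + window_size):
--             temp_feats = []
--             # loop over the window for feature in original sentence
--             for j in range(i - window_size, i + window_size + 1):
--                 temp_feats.extend(sentence[j])
--
--             # put token features together with label:
--             temp_f_l = (temp_feats, labels[l])
--             # put into windowed data:
--             windowed_data.append(temp_f_l)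
--             # iterate our labels index
--             l += 1
--     ### END YOUR CODE
--     return windowed_data
-- ===== SOURCE B (Python) =====
-- def make_windowed_data(data, start, end, window_size=1):
--     windowed_data = []
--     for sentence, labels in data:
--         if not sentence:
--             continue  # no words, no windows
--         padded = [start] * window_size + sentence + [end] * window_size
--         n = len(sentence)
--         # offset-major: one shifted view of the padded sentence per window offset,
--         # then transpose them with zip so each column is one window's words
--         shifts = [padded[d : d + n] for d in range(2 * window_size + 1)]
--         for cols, label in zip(zip(*shifts), labels):
--             feats = []
--             for word in cols:
--                 feats += word
--             windowed_data.append((feats, label))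
--     return windowed_data
-- ===== Notes on version B (the rewrite author's own statement) =====
-- stated objective: alternative
-- what changed: B is offset-major instead of position-major: for each sentence it builds the 2*window_size+1 shifted views of the padded sentence, transposes them with zip so each column is one window, and concatenates each column, removing A's counted middle loop and its inner per-offset extend loop entirely.
-- outside the precondition, e.g. on make_windowed_data([([[1], [2]], [3, 4])], [0], [0], -1): A returns [([], 3), ([], 4)], B returns []
import Mathlib
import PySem

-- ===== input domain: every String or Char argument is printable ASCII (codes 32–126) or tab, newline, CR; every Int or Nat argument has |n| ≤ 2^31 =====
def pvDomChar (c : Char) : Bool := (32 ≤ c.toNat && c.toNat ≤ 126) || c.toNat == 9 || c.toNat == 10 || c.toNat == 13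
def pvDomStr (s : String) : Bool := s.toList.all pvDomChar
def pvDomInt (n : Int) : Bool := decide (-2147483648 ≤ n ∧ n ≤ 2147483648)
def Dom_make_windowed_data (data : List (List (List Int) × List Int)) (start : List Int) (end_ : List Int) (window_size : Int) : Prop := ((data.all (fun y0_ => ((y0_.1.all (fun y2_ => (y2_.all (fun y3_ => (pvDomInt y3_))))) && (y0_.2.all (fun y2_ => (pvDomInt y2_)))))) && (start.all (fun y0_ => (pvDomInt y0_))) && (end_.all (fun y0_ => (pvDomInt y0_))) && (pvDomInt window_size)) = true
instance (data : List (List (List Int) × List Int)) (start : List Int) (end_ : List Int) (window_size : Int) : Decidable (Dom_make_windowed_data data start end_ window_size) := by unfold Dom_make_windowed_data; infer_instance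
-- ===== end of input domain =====

-- B is offset-major instead of A's position-major construction: it builds the 2w+1
-- shifted views of the padded sentence, transposes them with zip, and flattens each
-- column (objective: alternative, same asymptotic cost).

-- ===== PORT A =====
def make_windowed_data (data : List (List (List Int) × List Int)) (start : List Int) (end_ : List Int) (window_size : Int) : List (List Int × Int) :=
  data.foldl (fun windowed_data p =>
    let sentence := p.1
    let labels := p.2
    let orig_n : Int := sentence.length
    let sentence := PySem.List.pyRepeat [start] window_size ++ sentence ++ PySem.List.pyRepeat [end_] window_size
    -- inner loop state: (windowed_data, l)
    let st := (PySem.List.pyRange window_size (orig_n + window_size) 1).foldl (fun (st : List (List Int × Int) × Int) i =>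
      let temp_feats := (PySem.List.pyRange (i - window_size) (i + window_size + 1) 1).foldl
        (fun tf j => tf ++ PySem.List.pyGetD sentence j []) ([] : List Int)
      (st.1 ++ [(temp_feats, PySem.List.pyGetD labels st.2 0)], st.2 + 1)) (windowed_data, 0)
    st.1) []

-- ===== PORT B =====
-- hand port of Python's builtin zip(*xss) over lists (exact: stops at the shortest list);
-- pvHeadsTails returns (heads, tails) when every list is nonempty
def pvHeadsTails {α : Type} : List (List α) → Option (List α × List (List α))
  | [] => some ([], [])
  | [] :: _ => none
  | (x :: xs) :: rest => (pvHeadsTails rest).map (fun ht => (x :: ht.1, xs :: ht.2))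

def pvZipNAux {α : Type} : Nat → List (List α) → List (List α)
  | 0, _ => []
  | _, [] => []
  | fuel + 1, xss =>
    match pvHeadsTails xss with
    | none => []
    | some ht => ht.1 :: pvZipNAux fuel ht.2

-- zip stops at the shortest list, which is never longer than the first, so the
-- first list's length is enough fuel
def pvZipN {α : Type} (xss : List (List α)) : List (List α) :=
  pvZipNAux (xss.headD []).length xss

def make_windowed_data_alt (data : List (List (List Int) × List Int)) (start : List Int) (end_ : List Int) (window_size : Int) : List (List Int × Int) :=
  data.foldl (fun windowed_data p =>
    if p.1 = [] then windowed_data else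
    let sentence := p.1
    let labels := p.2
    let padded := PySem.List.pyRepeat [start] window_size ++ sentence ++ PySem.List.pyRepeat [end_] window_size
    let n : Int := sentence.length
    let shifts := (PySem.List.pyRange 0 (2 * window_size + 1) 1).map
      (fun d => PySem.List.slice padded (some d) (some (d + n)))
    ((pvZipN shifts).zip labels).foldl (fun acc cl =>
      acc ++ [(cl.1.foldl (fun feats word => feats ++ word) [], cl.2)]) windowed_data) []

-- ===== PRECONDITION & SPEC =====
-- Pre_ restricts to the task's natural domain: a non-negative window size (for negative
-- window_size A returns a degenerate list of empty windows while B emits fewer windows)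
-- and, so that A does not raise IndexError on labels[l], at least as many labels as
-- words in every sentence.
def Pre_make_windowed_data (data : List (List (List Int) × List Int)) (start : List Int) (end_ : List Int) (window_size : Int) : Prop :=
  0 ≤ window_size ∧ ∀ p ∈ data, p.1.length ≤ p.2.length
instance (data : List (List (List Int) × List Int)) (start : List Int) (end_ : List Int) (window_size : Int) : Decidable (Pre_make_windowed_data data start end_ window_size) := by unfold Pre_make_windowed_data; infer_instance

def pvWitness_make_windowed_data : (List (List (List Int) × List Int)) × List Int × List Int × Int :=
  ([([[1, 9], [2, 9]], [1, 1]), ([[3]], [4])], [5, 8], [6, 8], 1)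

def Spec_make_windowed_data (data : List (List (List Int) × List Int)) (start : List Int) (end_ : List Int) (window_size : Int) (out : List (List Int × Int)) : Prop := out = make_windowed_data_alt data start end_ window_size
instance (data : List (List (List Int) × List Int)) (start : List Int) (end_ : List Int) (window_size : Int) (out : List (List Int × Int)) : Decidable (Spec_make_windowed_data data start end_ window_size out) := by unfold Spec_make_windowed_data; infer_instance

-- ===== CLAIM (what is proved, stated in full; the proofs are below) =====
def Claim_equal_make_windowed_data : Prop := ∀ (data : List (List (List Int) × List Int)) (start : List Int) (end_ : List Int) (window_size : Int), Dom_make_windowed_data data start end_ window_size → Pre_make_windowed_data data start end_ window_size → Spec_make_windowed_data data start end_ window_size (make_windowed_data data start end_ window_size)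
-- ===== LEMMAS AND PROOFS =====

-- the canonical per-sentence result both loops are shown to produce
def pvCanon (padded : List (List Int)) (labels : List Int) (w n : Nat) : List (List Int × Int) :=
  (List.range n).map (fun l => (((padded.drop l).take (2 * w + 1)).flatten, labels.getD l 0))

-- A's innermost loop (temp_feats) flattens a window of the padded sentence
theorem pv_tf_lemma (xs : List (List Int)) (c : Nat) : ∀ (a : Nat) (init : List Int), a + c ≤ xs.length →
    (PySem.List.pyRange (a : Int) ((a : Int) + (c : Int)) 1).foldl
      (fun tf j => tf ++ PySem.List.pyGetD xs j []) init
    = init ++ ((xs.drop a).take c).flatten := by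
  induction c with
  | zero => intro a init h; simp [PySem.List.pyRange_one_eq_nil]
  | succ c ih =>
    intro a init h
    rw [PySem.List.pyRange_one_cons (by push_cast; omega)]
    have hcast : ((a : Int) + 1) = ((a + 1 : Nat) : Int) := by push_cast; ring
    have hcast2 : ((a : Int) + ((c + 1 : Nat) : Int)) = ((a + 1 : Nat) : Int) + (c : Int) := by push_cast; ring
    simp only [List.foldl_cons, hcast, hcast2]
    rw [ih (a + 1) _ (by omega)]
    have ha : a < xs.length := by omega
    have hget : PySem.List.pyGetD xs (a : Int) [] = xs[a] := by
      rw [PySem.List.pyGetD_natCast]; exact List.getD_eq_getElem _ _ ha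
    have hwin : (xs.drop a).take (c + 1) = xs[a] :: ((xs.drop (a + 1)).take c) := by
      rw [List.drop_eq_getElem_cons ha, List.take_succ_cons]
    rw [hget, hwin]
    simp

-- A's middle loop produces pvCanon and counts the labels
theorem pv_A_inner (padded : List (List Int)) (labels : List Int) (ws : Int) (hws : 0 ≤ ws)
    (n : Nat) (hn : n + 2 * ws.toNat ≤ padded.length) (wd : List (List Int × Int)) :
    (PySem.List.pyRange ws ((n : Int) + ws) 1).foldl (fun (st : List (List Int × Int) × Int) i =>
      let temp_feats := (PySem.List.pyRange (i - ws) (i + ws + 1) 1).foldl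
        (fun tf j => tf ++ PySem.List.pyGetD padded j []) ([] : List Int)
      (st.1 ++ [(temp_feats, PySem.List.pyGetD labels st.2 0)], st.2 + 1)) (wd, 0)
    = (wd ++ pvCanon padded labels ws.toNat n, (n : Int)) := by
  induction n with
  | zero => simp [pvCanon, PySem.List.pyRange_one_eq_nil]
  | succ n ih =>
    have hb : ((n + 1 : Nat) : Int) + ws = ((n : Int) + ws) + 1 := by push_cast; ring
    rw [hb, PySem.List.pyRange_one_succ_right (by omega), List.foldl_append, ih (by omega)]
    simp only [List.foldl_cons, List.foldl_nil]
    have h1 : (n : Int) + ws - ws = ((n : Nat) : Int) := by ring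
    have h2 : (n : Int) + ws + ws + 1 = ((n : Nat) : Int) + ((2 * ws.toNat + 1 : Nat) : Int) := by
      push_cast; omega
    rw [h1, h2, pv_tf_lemma padded (2 * ws.toNat + 1) n [] (by omega)]
    have h3 : PySem.List.pyGetD labels ((n : Nat) : Int) 0 = labels.getD n 0 := by
      rw [PySem.List.pyGetD_natCast]
    rw [h3]
    simp [pvCanon, List.range_succ]

-- pvHeadsTails on a list of nonempty lists is (heads, tails)
theorem pv_headsTails_eq {α : Type} (d : α) : ∀ (xss : List (List α)), (∀ xs ∈ xss, xs ≠ []) →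
    pvHeadsTails xss = some (xss.map (fun xs => xs.getD 0 d), xss.map List.tail) := by
  intro xss
  induction xss with
  | nil => intro _; simp [pvHeadsTails]
  | cons x rest ih =>
    intro h
    match x with
    | [] => exact absurd rfl (h [] (by simp))
    | a :: as =>
      simp only [pvHeadsTails, ih (fun xs hxs => h xs (by simp [hxs])), Option.map_some]
      simp

-- pvZipNAux on uniform-length lists is the index-wise transpose
theorem pv_zipNAux_uniform {α : Type} (d : α) : ∀ (n : Nat) (fuel : Nat) (xss : List (List α)),
    n ≤ fuel → (∀ xs ∈ xss, xs.length = n) →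
    pvZipNAux fuel xss = if xss = [] then [] else (List.range n).map (fun i => xss.map (fun xs => xs.getD i d)) := by
  intro n
  induction n with
  | zero =>
    intro fuel xss _ h
    match fuel, xss with
    | 0, _ => simp [pvZipNAux]
    | f + 1, [] => simp [pvZipNAux]
    | f + 1, y :: rest =>
      have : y = [] := List.eq_nil_of_length_eq_zero (h y (by simp))
      subst this
      simp [pvZipNAux, pvHeadsTails]
  | succ n ih =>
    intro fuel xss hfuel h
    match fuel, xss with
    | f + 1, [] => simp [pvZipNAux]
    | f + 1, y :: rest =>
      have hne : ∀ xs ∈ y :: rest, xs ≠ [] := by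
        intro xs hxs hemp
        have := h xs hxs
        simp [hemp] at this
      simp only [pvZipNAux, pv_headsTails_eq d _ hne]
      have htails : ∀ xs ∈ (y :: rest).map List.tail, xs.length = n := by
        intro xs hxs
        simp only [List.mem_map] at hxs
        obtain ⟨z, hz, rfl⟩ := hxs
        have := h z hz
        simp [List.length_tail, this]
      rw [ih f _ (by omega) htails, if_neg (by simp), if_neg (by simp)]
      rw [List.range_succ_eq_map]
      simp only [List.map_cons, List.map_map]
      congr 1
      apply List.map_congr_left
      intro i _
      simp only [Function.comp, Nat.succ_eq_add_one]
      have hstep : ∀ z ∈ y :: rest, (List.tail z).getD i d = z.getD (i + 1) d := by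
        intro z hz
        have hzlen := h z hz
        match z with
        | [] => simp at hzlen
        | a :: as => simp
      congr 1
      · exact hstep y (by simp)
      · apply List.map_congr_left
        intro z hz
        exact hstep z (by simp [hz])

-- and hence so is pvZipN, given at least one list
theorem pv_zipN_uniform {α : Type} (d : α) (n : Nat) (xss : List (List α))
    (hne : xss ≠ []) (h : ∀ xs ∈ xss, xs.length = n) :
    pvZipN xss = (List.range n).map (fun i => xss.map (fun xs => xs.getD i d)) := by
  unfold pvZipN
  have hfuel : (xss.headD []).length = n := by
    match xss with
    | [] => exact absurd rfl hne
    | y :: rest => exact h y (by simp)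
  rw [pv_zipNAux_uniform d n _ xss (by omega) h, if_neg hne]

-- a range-indexed map of getD is a drop/take window
theorem pv_window_eq (padded : List (List Int)) (i m : Nat) (h : i + m ≤ padded.length) :
    (List.range m).map (fun k => padded.getD (k + i) []) = (padded.drop i).take m := by
  apply List.ext_getElem
  · simp; omega
  · intro k h1 h2
    simp only [List.length_map, List.length_range] at h1
    simp only [List.getElem_map, List.getElem_range]
    rw [List.getD_eq_getElem _ _ (by omega)]
    simp only [List.getElem_take, List.getElem_drop]
    congr 1
    omega

-- appending singletons in a fold is map
theorem pv_foldl_append_map {α β : Type} (f : α → β) : ∀ (xs : List α) (acc : List β),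
    xs.foldl (fun acc x => acc ++ [f x]) acc = acc ++ xs.map f := by
  intro xs
  induction xs with
  | nil => simp
  | cons x rest ih => intro acc; simp [ih]

-- B's zip of windows and labels maps to the indexed form used by pvCanon
theorem pv_zip_canon (n : Nat) (f : Nat → List Int) (labels : List Int) (h : n ≤ labels.length) :
    ((List.range n).zip labels).map (fun il => (f il.1, il.2))
    = (List.range n).map (fun i => (f i, labels.getD i 0)) := by
  apply List.ext_getElem
  · simp; omega
  · intro i h1 h2
    simp only [List.getElem_map, List.getElem_zip, List.getElem_range]
    rw [List.getD_eq_getElem _ _ (by simp at h2; omega)]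

theorem make_windowed_data_spec : Claim_equal_make_windowed_data := by
  intro data start end_ ws _ hpre
  obtain ⟨hws, hlab⟩ := hpre
  unfold Spec_make_windowed_data make_windowed_data make_windowed_data_alt
  apply PySem.List.foldl_congr_mem
  intro wd p hp
  simp only
  by_cases hpe : p.1 = []
  · rw [if_pos hpe]
    simp only [hpe, List.length_nil, Nat.cast_zero, zero_add]
    rw [PySem.List.pyRange_one_eq_nil (by omega)]; rfl
  rw [if_neg hpe]
  set padded := PySem.List.pyRepeat [start] ws ++ p.1 ++ PySem.List.pyRepeat [end_] ws with hpad
  have hplen : padded.length = p.1.length + 2 * ws.toNat := by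
    simp [hpad, PySem.List.pyRepeat_singleton]; omega
  -- A side
  rw [pv_A_inner padded p.2 ws hws p.1.length (by omega) wd]
  -- B side
  have hm : (2 * ws + 1 - 0).toNat = 2 * ws.toNat + 1 := by omega
  have hshifts : (PySem.List.pyRange 0 (2 * ws + 1) 1).map
      (fun d => PySem.List.slice padded (some d) (some (d + (p.1.length : Int))))
      = (List.range (2 * ws.toNat + 1)).map (fun k => (padded.drop k).take p.1.length) := by
    rw [PySem.List.pyRange_one, hm, List.map_map]
    apply List.map_congr_left
    intro k _
    simp only [Function.comp, zero_add]
    exact PySem.List.slice_natCast_add padded k p.1.length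
  rw [hshifts]
  have huniform : ∀ xs ∈ (List.range (2 * ws.toNat + 1)).map (fun k => (padded.drop k).take p.1.length), xs.length = p.1.length := by
    intro xs hxs
    simp only [List.mem_map, List.mem_range] at hxs
    obtain ⟨k, hk, rfl⟩ := hxs
    simp [List.length_take, List.length_drop]
    omega
  rw [pv_zipN_uniform ([] : List Int) p.1.length _ (by simp) huniform]
  have hcols : ∀ i ∈ List.range p.1.length,
      ((List.range (2 * ws.toNat + 1)).map (fun k => (padded.drop k).take p.1.length)).map (fun xs => xs.getD i [])
      = (padded.drop i).take (2 * ws.toNat + 1) := by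
    intro i hi
    simp only [List.mem_range] at hi
    rw [List.map_map]
    rw [← pv_window_eq padded i (2 * ws.toNat + 1) (by omega)]
    apply List.map_congr_left
    intro k hk
    simp only [List.mem_range] at hk
    simp only [Function.comp]
    rw [List.getD_eq_getElem _ _ (by simp [List.length_take, List.length_drop]; omega),
        List.getD_eq_getElem _ _ (by omega)]
    simp only [List.getElem_take, List.getElem_drop]
  rw [pv_foldl_append_map]
  have hmapcongr : ((List.range p.1.length).map (fun i =>
        ((List.range (2 * ws.toNat + 1)).map (fun k => (padded.drop k).take p.1.length)).map (fun xs => xs.getD i []))).zip p.2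
      = ((List.range p.1.length).map (fun i => (padded.drop i).take (2 * ws.toNat + 1))).zip p.2 := by
    congr 1
    exact List.map_congr_left hcols
  rw [hmapcongr, List.zip_map_left, List.map_map]
  have hflat : ∀ cl : Nat × Int,
      ((fun cl : List (List Int) × Int => (cl.1.foldl (fun feats word => feats ++ word) [], cl.2)) ∘ Prod.map (fun i => (padded.drop i).take (2 * ws.toNat + 1)) id) cl
      = (((padded.drop cl.1).take (2 * ws.toNat + 1)).flatten, cl.2) := by
    intro cl
    simp only [Function.comp, Prod.map]
    rw [PySem.List.foldl_append_eq_flatten]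
    simp
  rw [List.map_congr_left (fun cl _ => hflat cl)]
  rw [pv_zip_canon p.1.length (fun i => ((padded.drop i).take (2 * ws.toNat + 1)).flatten) p.2 (hlab p hp)]
  rfl
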